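-- pv_equiv track=rewrite | github.com/tchapeaux/advent-of-code-2022 | day14.py | getVisualGrid
-- ===== SOURCE A (Python) =====
-- def getVisualGrid(rockBlocks, sandBlocks):
--     minX = min([r[0] for r in rockBlocks])
--     maxX = max([r[0] for r in rockBlocks])
--     minY = min([r[1] for r in rockBlocks])
--     maxY = max([r[1] for r in rockBlocks])
--
--     rows = [f"${minX} {maxX} {minY} {maxY}"]
--     for y in range(min(0, minY), maxY + 1):
--         rowStr = ""
--         for x in range(minX, maxX):
--             if x == 500 and y == 0:
--                 rowStr += "+"
--             elif (x, y) in rockBlocks: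
--                 rowStr += "#"
--             elif (x, y) in sandBlocks:
--                 rowStr += "."
--             else:
--                 rowStr += " "
--         rows.append(rowStr)
--
--     return "\n".join(rows)
-- ===== SOURCE B (Python) =====
-- def getVisualGrid(rockBlocks, sandBlocks):
--     minX = min(r[0] for r in rockBlocks)
--     maxX = max(r[0] for r in rockBlocks)
--     minY = min(r[1] for r in rockBlocks)
--     maxY = max(r[1] for r in rockBlocks)
--
--     rows = [f"${minX} {maxX} {minY} {maxY}"]
--     width = maxX - minX
--     for y in range(min(0, minY), maxY + 1):
--         buf = [" "] * width
--         for (sx, sy) in sandBlocks: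
--             if sy == y and minX <= sx < maxX:
--                 buf[sx - minX] = "."
--         for (rx, ry) in rockBlocks:
--             if ry == y and minX <= rx < maxX:
--                 buf[rx - minX] = "#"
--         if y == 0 and minX <= 500 < maxX:
--             buf[500 - minX] = "+"
--         rows.append("".join(buf))
--     return "\n".join(rows)
-- ===== Notes on version B (the rewrite author's own statement) =====
-- stated objective: faster
-- what changed: Instead of scanning every grid cell and testing list membership of (x,y) in rockBlocks/sandBlocks per cell, B allocates a space-filled row buffer per row and paints it by iterating once over the sand list, then the rock list, then stamping '+', so the per-cell linear scans disappear.
import Mathlib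
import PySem

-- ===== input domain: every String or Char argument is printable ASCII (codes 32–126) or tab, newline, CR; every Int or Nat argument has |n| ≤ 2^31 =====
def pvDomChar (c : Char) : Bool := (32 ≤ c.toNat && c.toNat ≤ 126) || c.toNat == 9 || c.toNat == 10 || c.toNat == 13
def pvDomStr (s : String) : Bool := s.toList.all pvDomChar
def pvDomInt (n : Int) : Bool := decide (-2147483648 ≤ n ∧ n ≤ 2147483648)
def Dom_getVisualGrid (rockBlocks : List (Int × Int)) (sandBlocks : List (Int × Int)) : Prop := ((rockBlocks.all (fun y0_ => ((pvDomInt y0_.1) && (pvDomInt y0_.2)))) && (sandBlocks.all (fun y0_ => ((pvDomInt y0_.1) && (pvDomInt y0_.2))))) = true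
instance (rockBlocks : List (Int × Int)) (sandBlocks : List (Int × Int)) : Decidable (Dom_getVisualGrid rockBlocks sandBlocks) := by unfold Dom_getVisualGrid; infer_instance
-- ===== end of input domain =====

-- B replaces A's per-cell membership scans with per-row paint passes over the block lists (faster: removes the inner scans); A raises on empty rockBlocks, excluded by Pre_.


-- ===== PORT A =====
def getVisualGrid (rockBlocks : List (Int × Int)) (sandBlocks : List (Int × Int)) : String :=
  match PySem.List.min? (rockBlocks.map (·.1)) (fun v => v), PySem.List.max? (rockBlocks.map (·.1)) (fun v => v),
        PySem.List.min? (rockBlocks.map (·.2)) (fun v => v), PySem.List.max? (rockBlocks.map (·.2)) (fun v => v) with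
  | some minX, some maxX, some minY, some maxY =>
    let header : String := String.ofList (['$'] ++ PySem.Int.toChars minX ++ [' '] ++ PySem.Int.toChars maxX ++ [' '] ++ PySem.Int.toChars minY ++ [' '] ++ PySem.Int.toChars maxY)
    let rows : List String := (PySem.List.pyRange (min 0 minY) (maxY + 1) 1).foldl (fun rows y =>
        let rowStr : List Char := (PySem.List.pyRange minX maxX 1).foldl (fun s x =>
            if x = 500 ∧ y = 0 then s ++ ['+']
            else if (x, y) ∈ rockBlocks then s ++ ['#']
            else if (x, y) ∈ sandBlocks then s ++ ['.']
            else s ++ [' ']) []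
        rows ++ [String.ofList rowStr]) [header]
    PySem.Str.join "\n" rows
  | _, _, _, _ => ""  -- unreachable under Pre_ (Python raises ValueError on empty rockBlocks)

-- ===== PORT B =====
def getVisualGrid_alt (rockBlocks : List (Int × Int)) (sandBlocks : List (Int × Int)) : String :=
  match PySem.List.min? (rockBlocks.map (·.1)) (fun v => v) with
  | none => ""  -- unreachable under Pre_ (min of an empty generator raises ValueError)
  | some minX =>
  match PySem.List.max? (rockBlocks.map (·.1)) (fun v => v) with
  | none => ""
  | some maxX =>
  match PySem.List.min? (rockBlocks.map (·.2)) (fun v => v) with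
  | none => ""
  | some minY =>
  match PySem.List.max? (rockBlocks.map (·.2)) (fun v => v) with
  | none => ""
  | some maxY =>
    let header : String := String.ofList (['$'] ++ PySem.Int.toChars minX ++ [' '] ++ PySem.Int.toChars maxX ++ [' '] ++ PySem.Int.toChars minY ++ [' '] ++ PySem.Int.toChars maxY)
    let width : Nat := (maxX - minX).toNat
    let rows : List String := (PySem.List.pyRange (min 0 minY) (maxY + 1) 1).foldl (fun rows y =>
        let buf0 : List Char := List.replicate width ' '
        let buf1 := sandBlocks.foldl (fun buf p =>
            if p.2 = y ∧ minX ≤ p.1 ∧ p.1 < maxX then buf.set (p.1 - minX).toNat '.' else buf) buf0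
        let buf2 := rockBlocks.foldl (fun buf p =>
            if p.2 = y ∧ minX ≤ p.1 ∧ p.1 < maxX then buf.set (p.1 - minX).toNat '#' else buf) buf1
        let buf3 := if y = 0 ∧ minX ≤ 500 ∧ (500 : Int) < maxX then buf2.set ((500 : Int) - minX).toNat '+' else buf2
        rows ++ [String.ofList buf3]) [header]
    PySem.Str.join "\n" rows

-- ===== PRECONDITION & SPEC =====
-- Pre_ excludes exactly the inputs where the Pythons raise: rockBlocks = [] makes min([]) raise ValueError in both A and B.
def Pre_getVisualGrid (rockBlocks : List (Int × Int)) (sandBlocks : List (Int × Int)) : Prop := rockBlocks ≠ []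
instance (rockBlocks : List (Int × Int)) (sandBlocks : List (Int × Int)) : Decidable (Pre_getVisualGrid rockBlocks sandBlocks) := by unfold Pre_getVisualGrid; infer_instance
def pvWitness_getVisualGrid : (List (Int × Int)) × (List (Int × Int)) := ([(498, 4), (502, 4), (500, 2)], [(500, 3), (499, 3)])

def Spec_getVisualGrid (rockBlocks : List (Int × Int)) (sandBlocks : List (Int × Int)) (out : String) : Prop := out = getVisualGrid_alt rockBlocks sandBlocks
instance (rockBlocks : List (Int × Int)) (sandBlocks : List (Int × Int)) (out : String) : Decidable (Spec_getVisualGrid rockBlocks sandBlocks out) := by unfold Spec_getVisualGrid; infer_instance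

-- ===== CLAIM (what is proved, stated in full; the proofs are below) =====
def Claim_equal_getVisualGrid : Prop := ∀ (rockBlocks : List (Int × Int)) (sandBlocks : List (Int × Int)), Dom_getVisualGrid rockBlocks sandBlocks → Pre_getVisualGrid rockBlocks sandBlocks → Spec_getVisualGrid rockBlocks sandBlocks (getVisualGrid rockBlocks sandBlocks)

-- ===== LEMMAS AND PROOFS =====

-- painting a constant char at the window positions of a block list: length is preserved
theorem paint_length (blocks : List (Int × Int)) (ch : Char) (y minX maxX : Int) (buf : List Char) :
    (blocks.foldl (fun buf p =>
        if p.2 = y ∧ minX ≤ p.1 ∧ p.1 < maxX then buf.set (p.1 - minX).toNat ch else buf) buf).length = buf.length := by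
  induction blocks generalizing buf with
  | nil => rfl
  | cons p bs ih =>
    simp only [List.foldl_cons]
    rw [ih]
    split_ifs
    · simp
    · simp

-- reading a cell of the painted buffer: '(minX+i, y) got painted iff it is in the list'
theorem paint_getElem? (blocks : List (Int × Int)) (ch : Char) (y minX maxX : Int) (buf : List Char)
    (hlen : buf.length = (maxX - minX).toNat) (i : Nat) (hi : i < (maxX - minX).toNat) :
    (blocks.foldl (fun buf p =>
        if p.2 = y ∧ minX ≤ p.1 ∧ p.1 < maxX then buf.set (p.1 - minX).toNat ch else buf) buf)[i]? =
      if (minX + (i : Int), y) ∈ blocks then some ch else buf[i]? := by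
  induction blocks generalizing buf with
  | nil => simp
  | cons p bs ih =>
    simp only [List.foldl_cons, List.mem_cons]
    have hwin : i < (maxX - minX) := by omega
    by_cases hp : p = (minX + (i : Int), y)
    · -- p paints exactly column i
      subst hp
      have hguard : ((minX + (i : Int), y).2 = y ∧ minX ≤ (minX + (i : Int), y).1 ∧ (minX + (i : Int), y).1 < maxX) := by
        constructor; · rfl
        constructor <;> simp <;> omega
      rw [if_pos hguard]
      have hidx : ((minX + (i : Int), y).1 - minX).toNat = i := by simp
      rw [hidx]
      rw [ih _ (by rw [List.length_set]; exact hlen), if_pos (Or.inl rfl)]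
      split_ifs with hmem
      · rfl
      · have hib : i < buf.length := by omega
        exact List.getElem?_set_self hib
    · -- p leaves column i alone
      have hstep : ∀ buf' : List Char, buf'.length = (maxX - minX).toNat →
          ((if p.2 = y ∧ minX ≤ p.1 ∧ p.1 < maxX then buf'.set (p.1 - minX).toNat ch else buf')[i]? = buf'[i]?) := by
        intro buf' _
        split_ifs with hg
        · rw [List.getElem?_set_ne]
          intro hji
          apply hp
          have h1 : p.1 - minX = (i : Int) := by omega
          have : p.1 = minX + (i : Int) := by omega
          exact Prod.ext this hg.1
        · rfl
      have hlen' : (if p.2 = y ∧ minX ≤ p.1 ∧ p.1 < maxX then buf.set (p.1 - minX).toNat ch else buf).length = (maxX - minX).toNat := by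
        split_ifs <;> simp [hlen]
      rw [ih _ hlen', hstep buf hlen]
      have : ¬ ((minX + (i : Int), y) = p) := fun h => hp h.symm
      simp [this]

-- one row: A's per-cell scan equals B's painted buffer
theorem row_eq (rockBlocks sandBlocks : List (Int × Int)) (minX maxX y : Int) :
    (PySem.List.pyRange minX maxX 1).foldl (fun s x =>
        if x = 500 ∧ y = 0 then s ++ ['+']
        else if (x, y) ∈ rockBlocks then s ++ ['#']
        else if (x, y) ∈ sandBlocks then s ++ ['.']
        else s ++ [' ']) [] =
    (if y = 0 ∧ minX ≤ 500 ∧ (500 : Int) < maxX then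
        (rockBlocks.foldl (fun buf p =>
            if p.2 = y ∧ minX ≤ p.1 ∧ p.1 < maxX then buf.set (p.1 - minX).toNat '#' else buf)
          (sandBlocks.foldl (fun buf p =>
            if p.2 = y ∧ minX ≤ p.1 ∧ p.1 < maxX then buf.set (p.1 - minX).toNat '.' else buf)
            (List.replicate (maxX - minX).toNat ' '))).set ((500 : Int) - minX).toNat '+'
      else
        rockBlocks.foldl (fun buf p =>
            if p.2 = y ∧ minX ≤ p.1 ∧ p.1 < maxX then buf.set (p.1 - minX).toNat '#' else buf)
          (sandBlocks.foldl (fun buf p =>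
            if p.2 = y ∧ minX ≤ p.1 ∧ p.1 < maxX then buf.set (p.1 - minX).toNat '.' else buf)
            (List.replicate (maxX - minX).toNat ' '))) := by
  have hstep : (fun (s : List Char) (x : Int) =>
        if x = 500 ∧ y = 0 then s ++ ['+']
        else if (x, y) ∈ rockBlocks then s ++ ['#']
        else if (x, y) ∈ sandBlocks then s ++ ['.']
        else s ++ [' ']) = fun s x => s ++ [if x = 500 ∧ y = 0 then '+'
        else if (x, y) ∈ rockBlocks then '#'
        else if (x, y) ∈ sandBlocks then '.'
        else ' '] := by
    funext s x; split_ifs <;> rfl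
  rw [hstep, PySem.List.foldl_append_singleton_eq_map, List.nil_append]
  -- lengths
  have hlen1 : ∀ buf : List Char, (sandBlocks.foldl (fun buf p =>
      if p.2 = y ∧ minX ≤ p.1 ∧ p.1 < maxX then buf.set (p.1 - minX).toNat '.' else buf) buf).length = buf.length :=
    fun buf => paint_length sandBlocks '.' y minX maxX buf
  have hlensand : (sandBlocks.foldl (fun buf p =>
      if p.2 = y ∧ minX ≤ p.1 ∧ p.1 < maxX then buf.set (p.1 - minX).toNat '.' else buf)
      (List.replicate (maxX - minX).toNat ' ')).length = (maxX - minX).toNat := by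
    rw [hlen1, List.length_replicate]
  have hlenrock : (rockBlocks.foldl (fun buf p =>
      if p.2 = y ∧ minX ≤ p.1 ∧ p.1 < maxX then buf.set (p.1 - minX).toNat '#' else buf)
      (sandBlocks.foldl (fun buf p =>
        if p.2 = y ∧ minX ≤ p.1 ∧ p.1 < maxX then buf.set (p.1 - minX).toNat '.' else buf)
        (List.replicate (maxX - minX).toNat ' '))).length = (maxX - minX).toNat := by
    rw [paint_length, hlensand]
  apply List.ext_getElem?
  intro i
  by_cases hi : i < (maxX - minX).toNat
  · -- in-range column i, cell x = minX + i
    have hL : ((PySem.List.pyRange minX maxX 1).map (fun x => if x = 500 ∧ y = 0 then '+'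
        else if (x, y) ∈ rockBlocks then '#'
        else if (x, y) ∈ sandBlocks then '.'
        else ' '))[i]? = some (if minX + (i : Int) = 500 ∧ y = 0 then '+'
        else if (minX + (i : Int), y) ∈ rockBlocks then '#'
        else if (minX + (i : Int), y) ∈ sandBlocks then '.'
        else ' ') := by
      rw [List.getElem?_map]
      rw [PySem.List.getElem?_pyRange_one, if_pos hi]
      rfl
    rw [hL]
    have hrock := paint_getElem? rockBlocks '#' y minX maxX _ hlensand i hi
    have hsand := paint_getElem? sandBlocks '.' y minX maxX (List.replicate (maxX - minX).toNat ' ') (by rw [List.length_replicate]) i hi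
    have hrep : (List.replicate (maxX - minX).toNat (' ' : Char))[i]? = some ' ' := by
      rw [List.getElem?_replicate]; simp [hi]
    by_cases hplus : y = 0 ∧ minX ≤ 500 ∧ (500 : Int) < maxX
    · rw [if_pos hplus]
      by_cases hcol : ((500 : Int) - minX).toNat = i
      · rw [hcol, List.getElem?_set_self (by rw [hlenrock]; exact hi)]
        have hx : minX + (i : Int) = 500 := by omega
        rw [if_pos ⟨hx, hplus.1⟩]
      · rw [List.getElem?_set_ne hcol, hrock, hsand, hrep]
        have hx : ¬ (minX + (i : Int) = 500 ∧ y = 0) := by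
          rintro ⟨h5, _⟩; exact hcol (by omega)
        rw [if_neg hx]
        split_ifs <;> rfl
    · rw [if_neg hplus, hrock, hsand, hrep]
      have hx : ¬ (minX + (i : Int) = 500 ∧ y = 0) := by
        rintro ⟨h5, h0⟩
        exact hplus ⟨h0, by omega, by omega⟩
      rw [if_neg hx]
      split_ifs <;> rfl
  · -- out of range: both none
    rw [List.getElem?_eq_none (by simp [PySem.List.length_pyRange_one]; omega)]
    split_ifs
    · rw [List.getElem?_eq_none (by rw [List.length_set, hlenrock]; omega)]
    · rw [List.getElem?_eq_none (by rw [hlenrock]; omega)]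

theorem getVisualGrid_spec : Claim_equal_getVisualGrid := by
  intro rockBlocks sandBlocks _ _
  unfold Spec_getVisualGrid getVisualGrid getVisualGrid_alt
  cases hminX : PySem.List.min? (rockBlocks.map (·.1)) (fun v => v) <;>
  cases hmaxX : PySem.List.max? (rockBlocks.map (·.1)) (fun v => v) <;>
  cases hminY : PySem.List.min? (rockBlocks.map (·.2)) (fun v => v) <;>
  cases hmaxY : PySem.List.max? (rockBlocks.map (·.2)) (fun v => v) <;>
  try rfl
  case some.some.some.some minX maxX minY maxY =>
    simp only []
    congr 1
    apply PySem.List.foldl_congr_mem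
    intro rows y _
    rw [row_eq rockBlocks sandBlocks minX maxX y]
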